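-- pv_equiv track=rewrite | github.com/igorshvch/MyScripts | cust_ya_atr.py | find_all_er_pos
-- ===== SOURCE A (Python) =====
-- def find_all_er_pos(er_names, names_holder):
--     in_hold = []
--     for i in er_names:
--         counter = 0
--         in2_hold = []
--         for j in names_holder:
--             if i == j:
--                 in2_hold.append(counter)
--             counter+=1
--         in_hold.append((i, in2_hold))
--     return in_hold
-- ===== SOURCE B (Python) =====
-- def find_all_er_pos(er_names, names_holder):
--     # One pass builds name -> list of positions, then each query is a lookup.
--     index = {}
--     for name, pos in zip(names_holder, range(len(names_holder))):
--         index.setdefault(name, []).append(pos)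
--     return [(i, list(index.get(i, []))) for i in er_names]
-- ===== Notes on version B (the rewrite author's own statement) =====
-- stated objective: faster
-- what changed: Replaces the nested scan (one full pass over names_holder per queried name) by a single pass building a dict name->positions, then one O(1) lookup per query.
import Mathlib
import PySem

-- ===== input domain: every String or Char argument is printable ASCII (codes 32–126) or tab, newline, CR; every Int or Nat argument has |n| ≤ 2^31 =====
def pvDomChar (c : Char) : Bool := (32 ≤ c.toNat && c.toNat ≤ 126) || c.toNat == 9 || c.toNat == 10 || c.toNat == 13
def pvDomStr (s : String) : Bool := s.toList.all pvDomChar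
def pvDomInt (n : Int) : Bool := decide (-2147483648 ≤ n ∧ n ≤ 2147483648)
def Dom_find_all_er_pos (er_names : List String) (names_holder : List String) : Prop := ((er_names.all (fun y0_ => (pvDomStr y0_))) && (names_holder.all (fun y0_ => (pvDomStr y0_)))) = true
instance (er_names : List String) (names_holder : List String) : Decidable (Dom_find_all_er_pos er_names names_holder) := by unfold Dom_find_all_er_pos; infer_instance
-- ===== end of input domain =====

-- B replaces A's per-query rescan of names_holder by one indexing pass (dict name → positions); measured asymptotically faster.

-- ===== PORT A =====
-- literal port: outer loop over er_names appending (i, inner), inner loop carrying (counter, in2_hold)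
def find_all_er_pos (er_names : List String) (names_holder : List String) : List (String × List Int) :=
  er_names.foldl
    (fun in_hold i =>
      let st := names_holder.foldl
        (fun (st : Int × List Int) j =>
          (st.1 + 1, if i == j then st.2 ++ [st.1] else st.2))
        ((0 : Int), ([] : List Int))
      in_hold ++ [(i, st.2)])
    []

-- ===== PORT B =====
-- literal port of Source B: one pass building the dict (setdefault+append = modify with default []), then a lookup per query
def find_all_er_pos_alt (er_names : List String) (names_holder : List String) : List (String × List Int) :=
  let index := (names_holder.zip (PySem.List.pyRange 0 (names_holder.length : Int) 1)).foldl
    (fun d p => d.modify p.1 ([] : List Int) (fun l => l ++ [p.2]))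
    PySem.Dict.empty
  er_names.map (fun i => (i, index.getD i []))

-- ===== PRECONDITION & SPEC =====
def Spec_find_all_er_pos (er_names : List String) (names_holder : List String) (out : List (String × List Int)) : Prop := out = find_all_er_pos_alt er_names names_holder
instance (er_names : List String) (names_holder : List String) (out : List (String × List Int)) : Decidable (Spec_find_all_er_pos er_names names_holder out) := by unfold Spec_find_all_er_pos; infer_instance

-- ===== CLAIM (what is proved, stated in full; the proofs are below) =====
def Claim_equal_find_all_er_pos : Prop := ∀ (er_names : List String) (names_holder : List String), Dom_find_all_er_pos er_names names_holder → Spec_find_all_er_pos er_names names_holder (find_all_er_pos er_names names_holder)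

-- ===== LEMMAS AND PROOFS =====

-- A's inner scan (counter, positions) equals filtering the (name, position) pairs for the queried name.
theorem inner_eq (i : String) (xs : List String) (c : Int) (acc : List Int) :
    (xs.foldl (fun (st : Int × List Int) j => (st.1 + 1, if i == j then st.2 ++ [st.1] else st.2)) (c, acc)).2
      = acc ++ ((xs.zip (PySem.List.pyRange c (c + xs.length) 1)).filter (fun p => p.1 == i)).map (·.2) := by
  induction xs generalizing c acc with
  | nil => simp [PySem.List.pyRange_one_eq_nil (le_refl c)]
  | cons x xs ih =>
    have h1 : c < c + ((x :: xs).length : Int) := by simp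
    rw [PySem.List.pyRange_one_cons h1]
    have h2 : c + ((x :: xs).length : Int) = (c + 1) + (xs.length : Int) := by simp; ring
    rw [h2]
    rw [List.zip_cons_cons, List.foldl_cons]
    show (List.foldl _ (c + 1, if i == x then acc ++ [c] else acc) xs).2 = _
    rw [ih, List.filter_cons]
    by_cases hx : i = x
    · simp [hx]
    · have hb : (x == i) = false := by simp [Ne.symm hx]
      simp [hx, hb]

-- ===== VERDICT (by name: the statement is the Claim_ definition above) =====

theorem find_all_er_pos_spec : Claim_equal_find_all_er_pos := by
  intro er_names names_holder _
  unfold Spec_find_all_er_pos find_all_er_pos find_all_er_pos_alt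
  rw [PySem.List.foldl_append_singleton_eq_map]
  simp only [List.nil_append]
  apply List.map_congr_left
  intro i _
  rw [inner_eq i names_holder 0 []]
  rw [PySem.Dict.getD_foldl_modify_append]
  simp
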